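-- pv_equiv track=rewrite | github.com/wojmichaluk/ASD-2022-2023 | extra/bit algo/4/3ab.py | lakes
-- ===== SOURCE A (Python) =====
-- def lakes(G):
--     n=len(G)
--     A=[[] for _ in range(n)]
--     for i in range(n):
--         for j in range(n):
--             if G[i][j]=='L': A[i].append(False)
--             else: A[i].append(True)
--     lakes=0
--     max_size=0
--     for i in range(n):
--         for j in range(n):
--             if not A[i][j]: continue
--             a=DFS(A,i,j)
--             lakes+=1
--             if a>max_size: max_size=a
--     return lakes,max_size
--
-- def DFS(A,r,c):
--     if not A[r][c]: return 0
--     A[r][c]=False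
--     a=b=d=e=0
--     if r-1>=0: a=DFS(A,r-1,c)
--     if r+1<len(A): b=DFS(A,r+1,c)
--     if c-1>=0: d=DFS(A,r,c-1)
--     if c+1<len(A): e=DFS(A,r,c+1)
--     return a+b+d+e+1
-- ===== SOURCE B (Python) =====
-- def lakes(G):
--     n = len(G)
--     A = [[G[i][j] != 'L' for j in range(n)] for i in range(n)]
--     count = 0
--     max_size = 0
--     for i in range(n):
--         for j in range(n):
--             if not A[i][j]:
--                 continue
--             size = 0
--             stack = [(i, j)]
--             while stack:
--                 r, c = stack.pop()
--                 if not A[r][c]: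
--                     continue
--                 A[r][c] = False
--                 size += 1
--                 if c + 1 < n: stack.append((r, c + 1))
--                 if c - 1 >= 0: stack.append((r, c - 1))
--                 if r + 1 < n: stack.append((r + 1, c))
--                 if r - 1 >= 0: stack.append((r - 1, c))
--             count += 1
--             if size > max_size:
--                 max_size = size
--     return count, max_size
-- ===== Notes on version B (the rewrite author's own statement) =====
-- stated objective: alternative
-- what changed: The recursive 4-way DFS is replaced by an iterative flood fill over an explicit stack (pop a cell, mark it, push in-bounds neighbours), removing recursion while keeping the grid-building pass and the outer seed scan.
import Mathlib
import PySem

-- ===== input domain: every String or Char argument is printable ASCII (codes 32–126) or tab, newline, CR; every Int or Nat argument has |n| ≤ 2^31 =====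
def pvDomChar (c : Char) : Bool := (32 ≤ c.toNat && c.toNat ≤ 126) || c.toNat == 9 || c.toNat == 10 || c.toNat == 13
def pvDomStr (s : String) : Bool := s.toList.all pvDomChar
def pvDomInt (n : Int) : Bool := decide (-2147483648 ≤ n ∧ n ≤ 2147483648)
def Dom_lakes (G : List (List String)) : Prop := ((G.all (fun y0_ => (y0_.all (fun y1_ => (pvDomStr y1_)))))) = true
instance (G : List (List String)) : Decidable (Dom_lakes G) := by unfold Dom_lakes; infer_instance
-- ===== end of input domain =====

-- B replaces A's recursive DFS by an iterative flood fill over an explicit stack (same pop order);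
-- objective: alternative. A mutates only its local grid, so only return values are at stake.

-- shared grid helpers: cell read/write and the count of True cells
def gget (A : List (List Bool)) (r c : Nat) : Bool := (A.getD r []).getD c false
def gset (A : List (List Bool)) (r c : Nat) (v : Bool) : List (List Bool) :=
  A.set r ((A.getD r []).set c v)
def countT (A : List (List Bool)) : Nat := (A.map (fun row => row.count true)).sum


-- ===== PORT A =====
-- A builds the Bool grid row by row with append loops
def buildA (G : List (List String)) (n : Nat) : List (List Bool) :=
  (List.range n).foldl
    (fun Acc i => Acc ++ [(List.range n).foldl
      (fun row j => row ++ [!(((G.getD i []).getD j "") == "L")]) []]) []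


-- A's recursive DFS; the fuel argument only makes the recursion total and DFSa passes
-- countT A + 1, which is always sufficient (each recursive call first clears one True cell)
def dfs (fuel : Nat) (A : List (List Bool)) (r c : Nat) : Nat × List (List Bool) :=
  match fuel with
  | 0 => (0, A)
  | fuel + 1 =>
    if gget A r c = false then (0, A)
    else
      let A0 := gset A r c false
      let p1 := if 1 ≤ r then dfs fuel A0 (r - 1) c else (0, A0)
      let p2 := if r + 1 < A.length then dfs fuel p1.2 (r + 1) c else (0, p1.2)
      let p3 := if 1 ≤ c then dfs fuel p2.2 r (c - 1) else (0, p2.2)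
      let p4 := if c + 1 < A.length then dfs fuel p3.2 r (c + 1) else (0, p3.2)
      (p1.1 + p2.1 + p3.1 + p4.1 + 1, p4.2)

def DFSa (A : List (List Bool)) (r c : Nat) : Nat × List (List Bool) :=
  dfs (countT A + 1) A r c


def lakes (G : List (List String)) : Int × Int :=
  let n := G.length
  let A := buildA G n
  let st := (List.range n).foldl (fun st i =>
    (List.range n).foldl (fun st j =>
      if gget st.1 i j = false then st
      else
        let p := DFSa st.1 i j
        (p.2, st.2.1 + 1, if st.2.2 < p.1 then p.1 else st.2.2)) st) (A, 0, 0)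
  (Int.ofNat st.2.1, Int.ofNat st.2.2)


-- ===== PORT B =====
-- B builds the Bool grid with comprehensions
def buildB (G : List (List String)) (n : Nat) : List (List Bool) :=
  (List.range n).map (fun i => (List.range n).map (fun j => !(((G.getD i []).getD j "") == "L")))


-- in-bounds neighbours in the order B pops them (Python pops at the list's end;
-- the Lean stack's head is the Python list's end)
def nbrs (n r c : Nat) : List (Nat × Nat) :=
  (if 1 ≤ r then [(r - 1, c)] else []) ++ (if r + 1 < n then [(r + 1, c)] else []) ++
  (if 1 ≤ c then [(r, c - 1)] else []) ++ (if c + 1 < n then [(r, c + 1)] else [])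


-- B's while loop over the explicit stack; the fuel only makes the loop total and flood
-- passes 5*countT + |stack| + 1, which is always sufficient (a True pop clears a cell and
-- pushes at most 4 neighbours, any other iteration just shortens the stack)
def floodF (fuel : Nat) (A : List (List Bool)) (stack : List (Nat × Nat)) (size : Nat) :
    Nat × List (List Bool) :=
  match fuel with
  | 0 => (size, A)
  | fuel + 1 =>
    match stack with
    | [] => (size, A)
    | (r, c) :: rest =>
      if gget A r c = true then
        floodF fuel (gset A r c false) (nbrs A.length r c ++ rest) (size + 1)
      else floodF fuel A rest size

def flood (A : List (List Bool)) (stack : List (Nat × Nat)) (size : Nat) :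
    Nat × List (List Bool) :=
  floodF (5 * countT A + stack.length + 1) A stack size


def lakes_alt (G : List (List String)) : Int × Int :=
  let n := G.length
  let A := buildB G n
  let st := (List.range n).foldl (fun st i =>
    (List.range n).foldl (fun st j =>
      if gget st.1 i j = false then st
      else
        let p := flood st.1 [(i, j)] 0
        (p.2, st.2.1 + 1, if st.2.2 < p.1 then p.1 else st.2.2)) st) (A, 0, 0)
  (Int.ofNat st.2.1, Int.ofNat st.2.2)


-- ===== PRECONDITION & SPEC =====
-- Pre_ excludes exactly the inputs on which Python A raises IndexError: a row shorter than len(G)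
def Pre_lakes (G : List (List String)) : Prop := ∀ row ∈ G, G.length ≤ row.length
instance (G : List (List String)) : Decidable (Pre_lakes G) := by unfold Pre_lakes; infer_instance
def pvWitness_lakes : List (List String) := [["L", "x"], ["x", "x"]]

def Spec_lakes (G : List (List String)) (out : Int × Int) : Prop := out = lakes_alt G
instance (G : List (List String)) (out : Int × Int) : Decidable (Spec_lakes G out) := by unfold Spec_lakes; infer_instance

-- ===== CLAIM (what is proved, stated in full; the proofs are below) =====
def Claim_equal_lakes : Prop := ∀ (G : List (List String)), Dom_lakes G → Pre_lakes G → Spec_lakes G (lakes G)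

-- ===== LEMMAS AND PROOFS =====

theorem sum_split (l : List Nat) (i : Nat) (hi : i < l.length) :
    l.sum = (l.take i).sum + l[i] + (l.drop (i+1)).sum := by
  conv_lhs => rw [← List.take_append_drop i l]
  rw [List.sum_append, ← List.getElem_cons_drop hi, List.sum_cons]
  omega


theorem countT_gset (A : List (List Bool)) (r c : Nat) (h : gget A r c = true) :
    countT (gset A r c false) + 1 = countT A := by
  have hr : r < A.length := by
    by_contra hr
    simp [gget, List.getD, List.getElem?_eq_none (Nat.le_of_not_lt hr)] at h
  have hA : A.getD r [] = A[r] := by simp [List.getD, List.getElem?_eq_getElem hr]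
  have hc : c < A[r].length := by
    by_contra hc
    simp [gget, List.getD, List.getElem?_eq_getElem hr,
      List.getElem?_eq_none (Nat.le_of_not_lt hc)] at h
  have hcell : A[r][c] = true := by
    simpa [gget, List.getD, List.getElem?_eq_getElem hr, List.getElem?_eq_getElem hc] using h
  have hcnt : (A[r].set c false).count true = A[r].count true - 1 := by
    rw [List.count_set hc]; simp [hcell]
  have hpos : 0 < A[r].count true := by
    rw [List.count_pos_iff]
    exact hcell ▸ List.getElem_mem hc
  have hrm : r < (A.map (fun row => row.count true)).length := by simpa using hr
  unfold countT gset
  rw [hA, List.map_set, List.sum_set]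
  rw [sum_split (A.map (fun row => row.count true)) r hrm]
  simp only [List.getElem_map, hcnt, hrm, if_pos]
  omega


theorem dfs_mono : ∀ (f : Nat) (A : List (List Bool)) (r c : Nat),
    countT (dfs f A r c).2 ≤ countT A := by
  intro f
  induction f with
  | zero => intro A r c; exact le_refl _
  | succ f ih =>
    intro A r c
    have step : ∀ (b : Prop) (inst : Decidable b) (X : List (List Bool)) (y z : Nat),
        countT (if b then dfs f X y z else (0, X)).2 ≤ countT X := by
      intro b inst X y z
      split
      · exact ih X y z
      · exact le_refl _
    simp only [dfs]
    split
    · exact le_refl _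
    · rename_i h
      have h' : gget A r c = true := by simpa using h
      have h0 := countT_gset A r c h'
      exact le_trans (step _ _ _ _ _) (le_trans (step _ _ _ _ _)
        (le_trans (step _ _ _ _ _) (le_trans (step _ _ _ _ _) (by omega))))


theorem dfs_irrel : ∀ (N : Nat) (A : List (List Bool)) (r c f g : Nat),
    countT A ≤ N → countT A < f → countT A < g → dfs f A r c = dfs g A r c := by
  intro N
  induction N with
  | zero =>
    intro A r c f g hN hf hg
    cases f with
    | zero => omega
    | succ f' =>
      cases g with
      | zero => omega
      | succ g' =>
        simp only [dfs]
        by_cases h : gget A r c = false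
        · simp [h]
        · exfalso
          have h' : gget A r c = true := by simpa using h
          have := countT_gset A r c h'
          omega
  | succ N ih =>
    intro A r c f g hN hf hg
    cases f with
    | zero => omega
    | succ f' =>
      cases g with
      | zero => omega
      | succ g' =>
        simp only [dfs]
        by_cases h : gget A r c = false
        · simp [h]
        · simp only [h]
          have h' : gget A r c = true := by simpa using h
          have h0 := countT_gset A r c h'
          have e1 : (if 1 ≤ r then dfs f' (gset A r c false) (r-1) c else (0, gset A r c false))
                  = (if 1 ≤ r then dfs g' (gset A r c false) (r-1) c else (0, gset A r c false)) := by
            split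
            · exact ih _ _ _ _ _ (by omega) (by omega) (by omega)
            · rfl
          rw [e1]
          have hb1 : countT (if 1 ≤ r then dfs g' (gset A r c false) (r-1) c else (0, gset A r c false)).2
              ≤ countT (gset A r c false) := by
            split
            · exact dfs_mono _ _ _ _
            · exact le_refl _
          have e2 : (if r+1 < A.length then dfs f' (if 1 ≤ r then dfs g' (gset A r c false) (r-1) c else (0, gset A r c false)).2 (r+1) c else (0, (if 1 ≤ r then dfs g' (gset A r c false) (r-1) c else (0, gset A r c false)).2))
                  = (if r+1 < A.length then dfs g' (if 1 ≤ r then dfs g' (gset A r c false) (r-1) c else (0, gset A r c false)).2 (r+1) c else (0, (if 1 ≤ r then dfs g' (gset A r c false) (r-1) c else (0, gset A r c false)).2)) := by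
            split
            · exact ih _ _ _ _ _ (by omega) (by omega) (by omega)
            · rfl
          rw [e2]
          have hb2 : countT (if r+1 < A.length then dfs g' (if 1 ≤ r then dfs g' (gset A r c false) (r-1) c else (0, gset A r c false)).2 (r+1) c else (0, (if 1 ≤ r then dfs g' (gset A r c false) (r-1) c else (0, gset A r c false)).2)).2 ≤ countT (if 1 ≤ r then dfs g' (gset A r c false) (r-1) c else (0, gset A r c false)).2 := by
            split
            · exact dfs_mono _ _ _ _
            · exact le_refl _
          generalize hX2 : (if r+1 < A.length then dfs g' (if 1 ≤ r then dfs g' (gset A r c false) (r-1) c else (0, gset A r c false)).2 (r+1) c else (0, (if 1 ≤ r then dfs g' (gset A r c false) (r-1) c else (0, gset A r c false)).2)) = X2 at *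
          have e3 : (if 1 ≤ c then dfs f' X2.2 r (c-1) else (0, X2.2))
                  = (if 1 ≤ c then dfs g' X2.2 r (c-1) else (0, X2.2)) := by
            split
            · exact ih _ _ _ _ _ (by omega) (by omega) (by omega)
            · rfl
          rw [e3]
          have hb3 : countT (if 1 ≤ c then dfs g' X2.2 r (c-1) else (0, X2.2)).2 ≤ countT X2.2 := by
            split
            · exact dfs_mono _ _ _ _
            · exact le_refl _
          generalize hX3 : (if 1 ≤ c then dfs g' X2.2 r (c-1) else (0, X2.2)) = X3 at *
          have e4 : (if c+1 < A.length then dfs f' X3.2 r (c+1) else (0, X3.2))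
                  = (if c+1 < A.length then dfs g' X3.2 r (c+1) else (0, X3.2)) := by
            split
            · exact ih _ _ _ _ _ (by omega) (by omega) (by omega)
            · rfl
          rw [e4]


def foldDFS (A : List (List Bool)) (l : List (Nat × Nat)) : Nat × List (List Bool) :=
  match l with
  | [] => (0, A)
  | x :: xs =>
    let p := DFSa A x.1 x.2
    let q := foldDFS p.2 xs
    (p.1 + q.1, q.2)


theorem DFSa_false (A : List (List Bool)) (r c : Nat) (h : gget A r c = false) :
    DFSa A r c = (0, A) := by
  unfold DFSa
  rw [dfs]
  simp [h]


theorem foldDFS_mono : ∀ (l : List (Nat × Nat)) (A : List (List Bool)),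
    countT (foldDFS A l).2 ≤ countT A := by
  intro l
  induction l with
  | nil => intro A; exact le_refl _
  | cons x xs ih =>
    intro A
    simp only [foldDFS]
    exact le_trans (ih _) (dfs_mono _ _ _ _)


theorem foldDFS_append : ∀ (l1 l2 : List (Nat × Nat)) (A : List (List Bool)),
    foldDFS A (l1 ++ l2) =
      ((foldDFS A l1).1 + (foldDFS (foldDFS A l1).2 l2).1, (foldDFS (foldDFS A l1).2 l2).2) := by
  intro l1
  induction l1 with
  | nil => intro l2 A; simp [foldDFS]
  | cons x xs ih =>
    intro l2 A
    simp only [List.cons_append, foldDFS, ih]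
    simp only [Prod.mk.injEq]
    exact ⟨by omega, trivial⟩


theorem foldDFS_ite (b : Prop) (inst : Decidable b) (A : List (List Bool)) (y z : Nat) :
    foldDFS A (if b then [(y, z)] else []) = if b then DFSa A y z else (0, A) := by
  split
  · simp [foldDFS]
  · rfl


theorem DFSa_step (A : List (List Bool)) (r c : Nat) (h : gget A r c = true) :
    DFSa A r c = ((foldDFS (gset A r c false) (nbrs A.length r c)).1 + 1,
                  (foldDFS (gset A r c false) (nbrs A.length r c)).2) := by
  have hk := countT_gset A r c h
  have conv2 : ∀ (X : List (List Bool)) (y z : Nat), countT X < countT A →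
      dfs (countT A) X y z = DFSa X y z := by
    intro X y z hX
    exact dfs_irrel (countT X) X y z _ _ (le_refl _) hX (by omega)
  conv_lhs => rw [DFSa, dfs]
  simp only [h, Bool.true_eq_false, if_false]
  simp only [nbrs, foldDFS_append, foldDFS_ite]
  -- p1: fuel countT A on grid A0
  have e1 : (if 1 ≤ r then dfs (countT A) (gset A r c false) (r-1) c else (0, gset A r c false))
          = (if 1 ≤ r then DFSa (gset A r c false) (r-1) c else (0, gset A r c false)) := by
    split
    · exact conv2 _ _ _ (by omega)
    · rfl
  rw [e1]
  have hb1 : countT (if 1 ≤ r then DFSa (gset A r c false) (r-1) c else (0, gset A r c false)).2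
      ≤ countT (gset A r c false) := by
    split
    · exact dfs_mono _ _ _ _
    · exact le_refl _
  generalize hQ1 : (if 1 ≤ r then DFSa (gset A r c false) (r-1) c else (0, gset A r c false)) = Q1 at *
  have e2 : (if r+1 < A.length then dfs (countT A) Q1.2 (r+1) c else (0, Q1.2))
          = (if r+1 < A.length then DFSa Q1.2 (r+1) c else (0, Q1.2)) := by
    split
    · exact conv2 _ _ _ (by omega)
    · rfl
  rw [e2]
  have hb2 : countT (if r+1 < A.length then DFSa Q1.2 (r+1) c else (0, Q1.2)).2 ≤ countT Q1.2 := by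
    split
    · exact dfs_mono _ _ _ _
    · exact le_refl _
  generalize hQ2 : (if r+1 < A.length then DFSa Q1.2 (r+1) c else (0, Q1.2)) = Q2 at *
  have e3 : (if 1 ≤ c then dfs (countT A) Q2.2 r (c-1) else (0, Q2.2))
          = (if 1 ≤ c then DFSa Q2.2 r (c-1) else (0, Q2.2)) := by
    split
    · exact conv2 _ _ _ (by omega)
    · rfl
  rw [e3]
  have hb3 : countT (if 1 ≤ c then DFSa Q2.2 r (c-1) else (0, Q2.2)).2 ≤ countT Q2.2 := by
    split
    · exact dfs_mono _ _ _ _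
    · exact le_refl _
  generalize hQ3 : (if 1 ≤ c then DFSa Q2.2 r (c-1) else (0, Q2.2)) = Q3 at *
  have e4 : (if c+1 < A.length then dfs (countT A) Q3.2 r (c+1) else (0, Q3.2))
          = (if c+1 < A.length then DFSa Q3.2 r (c+1) else (0, Q3.2)) := by
    split
    · exact conv2 _ _ _ (by omega)
    · rfl
  rw [e4]


theorem nbrs_len (n r c : Nat) : (nbrs n r c).length ≤ 4 := by
  unfold nbrs
  split <;> split <;> split <;> split <;> simp


theorem floodF_irrel : ∀ (f g : Nat) (A : List (List Bool)) (stack : List (Nat × Nat)) (size : Nat),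
    5 * countT A + stack.length < f → 5 * countT A + stack.length < g →
    floodF f A stack size = floodF g A stack size := by
  intro f
  induction f with
  | zero => intro g A stack size hf hg; omega
  | succ f ih =>
    intro g A stack size hf hg
    cases g with
    | zero => omega
    | succ g =>
      cases stack with
      | nil => rfl
      | cons x rest =>
        obtain ⟨r, c⟩ := x
        simp only [floodF]
        split
        · rename_i hg'
          have hk := countT_gset A r c hg'
          have hn := nbrs_len A.length r c
          simp only [List.length_cons] at hf hg
          exact ih g _ _ _ (by simp only [List.length_append]; omega)
            (by simp only [List.length_append]; omega)
        · simp only [List.length_cons] at hf hg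
          exact ih g _ _ _ (by omega) (by omega)


theorem flood_nil (A : List (List Bool)) (size : Nat) : flood A [] size = (size, A) := rfl


theorem flood_cons (A : List (List Bool)) (r c : Nat) (rest : List (Nat × Nat)) (size : Nat) :
    flood A ((r, c) :: rest) size =
      if gget A r c = true then flood (gset A r c false) (nbrs A.length r c ++ rest) (size + 1)
      else flood A rest size := by
  unfold flood
  conv_lhs => rw [floodF]
  simp only [List.length_cons]
  split
  · rename_i hg
    have hk := countT_gset A r c hg
    have hn := nbrs_len A.length r c
    apply floodF_irrel <;> simp only [List.length_append] <;> omega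
  · apply floodF_irrel <;> omega


theorem sim : ∀ (N : Nat) (seeds : List (Nat × Nat)) (A : List (List Bool))
    (S : List (Nat × Nat)) (size : Nat), countT A ≤ N →
    flood A (seeds ++ S) size = flood (foldDFS A seeds).2 S (size + (foldDFS A seeds).1) := by
  intro N
  induction N with
  | zero =>
    intro seeds
    induction seeds with
    | nil => intro A S size hN; simp [foldDFS]
    | cons x xs ihs =>
      intro A S size hN
      obtain ⟨r, c⟩ := x
      have hfalse : gget A r c = false := by
        by_cases hg : gget A r c = true
        · have := countT_gset A r c hg; omega
        · simpa using hg
      rw [List.cons_append, flood_cons]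
      simp only [hfalse, Bool.false_eq_true, if_false]
      rw [ihs A S size hN]
      simp only [foldDFS, DFSa_false A r c hfalse]
      simp
  | succ N ih =>
    intro seeds
    induction seeds with
    | nil => intro A S size hN; simp [foldDFS]
    | cons x xs ihs =>
      intro A S size hN
      obtain ⟨r, c⟩ := x
      by_cases hg : gget A r c = true
      · have hk := countT_gset A r c hg
        rw [List.cons_append, flood_cons]
        simp only [hg, if_true]
        rw [ih (nbrs A.length r c) (gset A r c false) (xs ++ S) (size + 1) (by omega)]
        rw [ih xs _ S _ (le_trans (foldDFS_mono _ _) (by omega))]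
        simp only [foldDFS]
        rw [DFSa_step A r c hg]
        dsimp only
        congr 1
        omega
      · have hfalse : gget A r c = false := by simpa using hg
        rw [List.cons_append, flood_cons]
        simp only [hfalse, Bool.false_eq_true, if_false]
        rw [ihs A S size hN]
        simp only [foldDFS, DFSa_false A r c hfalse]
        simp


theorem flood_single (A : List (List Bool)) (i j : Nat) :
    flood A [(i, j)] 0 = DFSa A i j := by
  have h := sim (countT A) [(i, j)] A [] 0 (le_refl _)
  simp only [List.append_nil] at h
  rw [h]
  simp [foldDFS, flood_nil]


theorem foldl_push {α β : Type} (l : List α) (g : α → List β) :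
    ∀ (init : List (List β)), l.foldl (fun acc x => acc ++ [g x]) init = init ++ l.map g := by
  induction l with
  | nil => intro init; simp
  | cons x xs ih => intro init; simp [ih]


theorem foldl_push' {α β : Type} (l : List α) (g : α → β) :
    ∀ (init : List β), l.foldl (fun acc x => acc ++ [g x]) init = init ++ l.map g := by
  induction l with
  | nil => intro init; simp
  | cons x xs ih => intro init; simp [ih]


theorem build_eq (G : List (List String)) (n : Nat) : buildA G n = buildB G n := by
  unfold buildA buildB
  rw [foldl_push (List.range n) (fun i => (List.range n).foldl
      (fun row j => row ++ [!(((G.getD i []).getD j "") == "L")]) [])]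
  simp only [List.nil_append]
  apply List.map_congr_left
  intro i _
  rw [foldl_push' (List.range n) (fun j => !(((G.getD i []).getD j "") == "L"))]
  simp


theorem lakes_eq (G : List (List String)) : lakes G = lakes_alt G := by
  unfold lakes lakes_alt
  dsimp only
  rw [build_eq]
  simp only [flood_single]


-- ===== VERDICT (by name: the statement is the Claim_ definition above) =====
theorem lakes_spec : Claim_equal_lakes := by
  intro G _ _
  show lakes G = lakes_alt G
  exact lakes_eq G
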